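-- pv_equiv track=rewrite | github.com/XAheli/AgriIR | organized_database_creation/autonomous_agent_search/src/autonomous_agriculture_curator.py | _identify_search_strategy
-- ===== SOURCE A (Python) =====
-- def _identify_search_strategy(query: str) -> str:
--     """Identify which search strategy was used"""
--     query_lower = query.lower()
--
--     if any(word in query_lower for word in ['vs', 'comparison', 'compare']):
--         return 'comparative_analysis'
--     elif any(word in query_lower for word in ['trend', 'over time', 'historical']):
--         return 'temporal_analysis'
--     elif any(word in query_lower for word in ['impact', 'effect', 'influence']):
--         return 'impact_assessment'
--     elif any(inst in query_lower for inst in ['icar', 'iari', 'research']):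
--         return 'institution_focused'
--     elif any(tech in query_lower for tech in ['iot', 'ai', 'precision', 'smart']):
--         return 'technology_integration'
--     else:
--         return 'general_exploration'
-- ===== SOURCE B (Python) =====
-- # B: single left-to-right scan of the lowercased query; at each position check which
-- # flat keywords start there and keep the minimum priority seen; objective: alternative.
-- _KEYWORD_PRIORITY = [
--     ('vs', 0), ('comparison', 0), ('compare', 0),
--     ('trend', 1), ('over time', 1), ('historical', 1),
--     ('impact', 2), ('effect', 2), ('influence', 2),
--     ('icar', 3), ('iari', 3), ('research', 3),
--     ('iot', 4), ('ai', 4), ('precision', 4), ('smart', 4),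
-- ]
-- _NAMES = ['comparative_analysis', 'temporal_analysis', 'impact_assessment',
--           'institution_focused', 'technology_integration', 'general_exploration']
--
-- def _identify_search_strategy(query: str) -> str:
--     q = query.lower()
--     best = 5
--     for i in range(len(q)):
--         for kw, p in _KEYWORD_PRIORITY:
--             if p < best and q.startswith(kw, i):
--                 best = p
--     return _NAMES[best]
-- ===== Notes on version B (the rewrite author's own statement) =====
-- stated objective: alternative
-- what changed: Replaced the if/elif chain of substring-membership tests with a single left-to-right scan of the lowercased query that checks, at each position, which keyword of a flat keyword-to-priority table starts there and keeps the minimum priority seen, indexing a name table at the end.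
import Mathlib
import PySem

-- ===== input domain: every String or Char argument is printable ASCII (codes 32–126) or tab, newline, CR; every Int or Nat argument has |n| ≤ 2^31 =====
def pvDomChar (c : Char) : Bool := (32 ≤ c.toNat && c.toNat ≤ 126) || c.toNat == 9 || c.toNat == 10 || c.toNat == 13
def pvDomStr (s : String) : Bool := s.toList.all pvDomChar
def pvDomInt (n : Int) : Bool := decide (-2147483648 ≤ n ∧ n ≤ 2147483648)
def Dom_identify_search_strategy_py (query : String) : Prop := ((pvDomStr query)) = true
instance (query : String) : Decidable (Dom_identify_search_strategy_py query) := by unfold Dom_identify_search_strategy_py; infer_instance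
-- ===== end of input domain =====

-- ===== PORT A =====
-- B replaces A's if/elif chain of substring-membership tests by a single left-to-right
-- scan of the string keeping the minimum priority of any keyword starting at each
-- position; objective: alternative (same cost, different algorithm).
def identify_search_strategy_py (query : String) : String :=
  let query_lower := PySem.Str.lower query
  if ["vs", "comparison", "compare"].any (fun word => PySem.Str.isIn word query_lower) then
    "comparative_analysis"
  else if ["trend", "over time", "historical"].any (fun word => PySem.Str.isIn word query_lower) then
    "temporal_analysis"
  else if ["impact", "effect", "influence"].any (fun word => PySem.Str.isIn word query_lower) then
    "impact_assessment"
  else if ["icar", "iari", "research"].any (fun inst => PySem.Str.isIn inst query_lower) then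
    "institution_focused"
  else if ["iot", "ai", "precision", "smart"].any (fun tech => PySem.Str.isIn tech query_lower) then
    "technology_integration"
  else
    "general_exploration"

-- ===== PORT B =====
-- flat keyword → priority table (Source B's _KEYWORD_PRIORITY)
def pvKwPriority : List (String × Nat) :=
  [("vs", 0), ("comparison", 0), ("compare", 0),
   ("trend", 1), ("over time", 1), ("historical", 1),
   ("impact", 2), ("effect", 2), ("influence", 2),
   ("icar", 3), ("iari", 3), ("research", 3),
   ("iot", 4), ("ai", 4), ("precision", 4), ("smart", 4)]

-- Source B's _NAMES
def pvNames : List String :=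
  ["comparative_analysis", "temporal_analysis", "impact_assessment",
   "institution_focused", "technology_integration", "general_exploration"]

-- inner loop body: `if p < best and q.startswith(kw, i): best = p`
def pvStep (s : List Char) (b : Nat) (kp : String × Nat) : Nat :=
  if kp.2 < b ∧ PySem.Chars.startswith s kp.1.toList = true then kp.2 else b

-- the `for i in range(len(q))` / `for kw, p in _KEYWORD_PRIORITY` double loop
def pvBest (q : List Char) : Nat :=
  (List.range q.length).foldl (fun best i => pvKwPriority.foldl (pvStep (q.drop i)) best) 5

def identify_search_strategy_py_alt (query : String) : String :=
  let q := (PySem.Str.lower query).toList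
  (PySem.List.pyGet? pvNames (pvBest q : Int)).getD ""

-- ===== PRECONDITION & SPEC =====
def Spec_identify_search_strategy_py (query : String) (out : String) : Prop := out = identify_search_strategy_py_alt query
instance (query : String) (out : String) : Decidable (Spec_identify_search_strategy_py query out) := by unfold Spec_identify_search_strategy_py; infer_instance

-- ===== CLAIM (what is proved, stated in full; the proofs are below) =====
def Claim_equal_identify_search_strategy_py : Prop := ∀ (query : String), Dom_identify_search_strategy_py query → Spec_identify_search_strategy_py query (identify_search_strategy_py query)

-- ===== LEMMAS AND PROOFS =====

set_option maxHeartbeats 1000000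

lemma pvStep_le (s : List Char) (b : Nat) (kp : String × Nat) : pvStep s b kp ≤ b := by
  unfold pvStep; split_ifs with h
  · exact Nat.le_of_lt h.1
  · exact le_rfl

lemma foldl_step_le (s : List Char) (L : List (String × Nat)) (b : Nat) :
    L.foldl (pvStep s) b ≤ b := by
  induction L generalizing b with
  | nil => exact le_rfl
  | cons a t ih => exact le_trans (ih (pvStep s b a)) (pvStep_le s b a)

lemma foldl_step_min (s : List Char) (L : List (String × Nat)) (b : Nat)
    (kp : String × Nat) (hm : kp ∈ L)
    (hs : PySem.Chars.startswith s kp.1.toList = true) :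
    L.foldl (pvStep s) b ≤ kp.2 := by
  induction L generalizing b with
  | nil => cases hm
  | cons a t ih =>
    rcases List.mem_cons.mp hm with rfl | hmt
    · refine le_trans (foldl_step_le s t (pvStep s b kp)) ?_
      unfold pvStep
      split_ifs with h
      · exact le_rfl
      · rw [not_and] at h
        by_cases hlt : kp.2 < b
        · exact absurd hs (h hlt)
        · exact Nat.le_of_not_lt hlt
    · exact ih (pvStep s b a) hmt

lemma foldl_step_spec (s : List Char) (L : List (String × Nat)) (b : Nat) :
    L.foldl (pvStep s) b = b ∨
      ∃ kp ∈ L, L.foldl (pvStep s) b = kp.2 ∧ PySem.Chars.startswith s kp.1.toList = true := by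
  induction L generalizing b with
  | nil => exact Or.inl rfl
  | cons a t ih =>
    rcases ih (pvStep s b a) with h | ⟨kp, hm, he, hs⟩
    · rw [List.foldl_cons, h]
      unfold pvStep
      split_ifs with hc
      · exact Or.inr ⟨a, List.mem_cons_self, rfl, hc.2⟩
      · exact Or.inl rfl
    · exact Or.inr ⟨kp, List.mem_cons_of_mem a hm, he, hs⟩

lemma outer_le (q : List Char) (L : List (String × Nat)) (I : List Nat) (b : Nat) :
    I.foldl (fun best i => L.foldl (pvStep (q.drop i)) best) b ≤ b := by
  induction I generalizing b with
  | nil => exact le_rfl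
  | cons a t ih =>
    exact le_trans (ih (L.foldl (pvStep (q.drop a)) b)) (foldl_step_le (q.drop a) L b)

lemma outer_min (q : List Char) (L : List (String × Nat)) (I : List Nat) (b : Nat)
    (i : Nat) (hi : i ∈ I) (kp : String × Nat) (hm : kp ∈ L)
    (hs : PySem.Chars.startswith (q.drop i) kp.1.toList = true) :
    I.foldl (fun best i => L.foldl (pvStep (q.drop i)) best) b ≤ kp.2 := by
  induction I generalizing b with
  | nil => cases hi
  | cons a t ih =>
    rcases List.mem_cons.mp hi with rfl | hit
    · exact le_trans (outer_le q L t (L.foldl (pvStep (q.drop i)) b))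
        (foldl_step_min (q.drop i) L b kp hm hs)
    · exact ih (L.foldl (pvStep (q.drop a)) b) hit

lemma outer_spec (q : List Char) (L : List (String × Nat)) (I : List Nat) (b : Nat) :
    I.foldl (fun best i => L.foldl (pvStep (q.drop i)) best) b = b ∨
      ∃ i ∈ I, ∃ kp ∈ L,
        I.foldl (fun best i => L.foldl (pvStep (q.drop i)) best) b = kp.2 ∧
        PySem.Chars.startswith (q.drop i) kp.1.toList = true := by
  induction I generalizing b with
  | nil => exact Or.inl rfl
  | cons a t ih =>
    rcases ih (L.foldl (pvStep (q.drop a)) b) with h | ⟨i, hi, kp, hm, he, hs⟩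
    · rw [List.foldl_cons, h]
      rcases foldl_step_spec (q.drop a) L b with h2 | ⟨kp, hm, he, hs⟩
      · exact Or.inl h2
      · exact Or.inr ⟨a, List.mem_cons_self, kp, hm, he, hs⟩
    · exact Or.inr ⟨i, List.mem_cons_of_mem a hi, kp, hm, he, hs⟩

lemma isIn_of_startswith (q kw : List Char) (i : Nat)
    (h : PySem.Chars.startswith (q.drop i) kw = true) :
    PySem.Chars.isIn kw q = true := by
  rw [← PySem.Chars.exists_prefix_drop_iff_isIn]
  exact ⟨i, (PySem.Chars.startswith_iff _ _).mp h⟩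

lemma exists_startswith_of_isIn (q kw : List Char) (hk : kw ≠ [])
    (h : PySem.Chars.isIn kw q = true) :
    ∃ i ∈ List.range q.length, PySem.Chars.startswith (q.drop i) kw = true := by
  rw [← PySem.Chars.exists_prefix_drop_iff_isIn] at h
  obtain ⟨j, hj⟩ := h
  by_cases hjl : j < q.length
  · refine ⟨j, List.mem_range.mpr hjl, ?_⟩
    rw [PySem.Chars.startswith_iff]
    exact hj
  · exfalso
    rw [List.drop_eq_nil_of_le (Nat.le_of_not_lt hjl)] at hj
    exact hk (List.prefix_nil.mp hj)

-- B's best is bounded by the priority of any table keyword occurring in q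
lemma pvBest_le_of_isIn (q : List Char) (kp : String × Nat) (hm : kp ∈ pvKwPriority)
    (hk : kp.1.toList ≠ []) (h : PySem.Chars.isIn kp.1.toList q = true) :
    pvBest q ≤ kp.2 := by
  obtain ⟨i, hi, hs⟩ := exists_startswith_of_isIn q kp.1.toList hk h
  unfold pvBest
  exact outer_min q pvKwPriority (List.range q.length) 5 i hi kp hm hs

lemma pvBest_le (q : List Char) : pvBest q ≤ 5 := by
  unfold pvBest
  exact outer_le q pvKwPriority (List.range q.length) 5

-- B's best is 5 or the priority of some table keyword occurring in q
lemma pvBest_spec (q : List Char) :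
    pvBest q = 5 ∨
      ∃ kp ∈ pvKwPriority, pvBest q = kp.2 ∧ PySem.Chars.isIn kp.1.toList q = true := by
  unfold pvBest
  rcases outer_spec q pvKwPriority (List.range q.length) 5 with h | ⟨i, _, kp, hm, he, hs⟩
  · exact Or.inl h
  · exact Or.inr ⟨kp, hm, he, isIn_of_startswith q kp.1.toList i hs⟩

lemma pvBest_ge (q : List Char) (g : Nat) (hg : g ≤ 5)
    (h : ∀ kp ∈ pvKwPriority, PySem.Chars.isIn kp.1.toList q = true → g ≤ kp.2) :
    g ≤ pvBest q := by
  rcases pvBest_spec q with he | ⟨kp, hm, he, hin⟩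
  · omega
  · rw [he]; exact h kp hm hin

-- ===== VERDICT (by name: the statement is the Claim_ definition above) =====
theorem identify_search_strategy_py_spec : Claim_equal_identify_search_strategy_py := by
  intro query _
  unfold Spec_identify_search_strategy_py
  simp only [identify_search_strategy_py, identify_search_strategy_py_alt]
  split_ifs with h1 h2 h3 h4 h5
  · -- branch 0: comparative_analysis
    simp only [List.any_cons, List.any_nil, Bool.or_eq_true, Bool.false_eq_true, or_false, PySem.Str.isIn_eq] at h1
    have hle : pvBest ((PySem.Str.lower query).toList) ≤ 0 := by
      rcases h1 with h | h | h
      · exact pvBest_le_of_isIn _ ("vs", 0) (by simp [pvKwPriority]) (by decide) h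
      · exact pvBest_le_of_isIn _ ("comparison", 0) (by simp [pvKwPriority]) (by decide) h
      · exact pvBest_le_of_isIn _ ("compare", 0) (by simp [pvKwPriority]) (by decide) h
    have hge : 0 ≤ pvBest ((PySem.Str.lower query).toList) := by
      refine pvBest_ge _ 0 (by omega) ?_
      intro kp hm hin
      simp only [pvKwPriority, List.mem_cons, List.not_mem_nil, or_false] at hm
      rcases hm with rfl | rfl | rfl | rfl | rfl | rfl | rfl | rfl | rfl | rfl | rfl | rfl | rfl | rfl | rfl | rfl
      · decide
      · decide
      · decide
      · decide
      · decide
      · decide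
      · decide
      · decide
      · decide
      · decide
      · decide
      · decide
      · decide
      · decide
      · decide
      · decide
    have heq : pvBest ((PySem.Str.lower query).toList) = 0 := le_antisymm hle hge
    rw [heq]
    decide
  · -- branch 1: temporal_analysis
    simp only [List.any_cons, List.any_nil, Bool.or_eq_true, Bool.false_eq_true, or_false, not_or, PySem.Str.isIn_eq] at h1 h2
    have hle : pvBest ((PySem.Str.lower query).toList) ≤ 1 := by
      rcases h2 with h | h | h
      · exact pvBest_le_of_isIn _ ("trend", 1) (by simp [pvKwPriority]) (by decide) h
      · exact pvBest_le_of_isIn _ ("over time", 1) (by simp [pvKwPriority]) (by decide) h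
      · exact pvBest_le_of_isIn _ ("historical", 1) (by simp [pvKwPriority]) (by decide) h
    have hge : 1 ≤ pvBest ((PySem.Str.lower query).toList) := by
      refine pvBest_ge _ 1 (by omega) ?_
      intro kp hm hin
      simp only [pvKwPriority, List.mem_cons, List.not_mem_nil, or_false] at hm
      rcases hm with rfl | rfl | rfl | rfl | rfl | rfl | rfl | rfl | rfl | rfl | rfl | rfl | rfl | rfl | rfl | rfl
      · exact absurd hin h1.1
      · exact absurd hin h1.2.1
      · exact absurd hin h1.2.2
      · decide
      · decide
      · decide
      · decide
      · decide
      · decide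
      · decide
      · decide
      · decide
      · decide
      · decide
      · decide
      · decide
    have heq : pvBest ((PySem.Str.lower query).toList) = 1 := le_antisymm hle hge
    rw [heq]
    decide
  · -- branch 2: impact_assessment
    simp only [List.any_cons, List.any_nil, Bool.or_eq_true, Bool.false_eq_true, or_false, not_or, PySem.Str.isIn_eq] at h1 h2 h3
    have hle : pvBest ((PySem.Str.lower query).toList) ≤ 2 := by
      rcases h3 with h | h | h
      · exact pvBest_le_of_isIn _ ("impact", 2) (by simp [pvKwPriority]) (by decide) h
      · exact pvBest_le_of_isIn _ ("effect", 2) (by simp [pvKwPriority]) (by decide) h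
      · exact pvBest_le_of_isIn _ ("influence", 2) (by simp [pvKwPriority]) (by decide) h
    have hge : 2 ≤ pvBest ((PySem.Str.lower query).toList) := by
      refine pvBest_ge _ 2 (by omega) ?_
      intro kp hm hin
      simp only [pvKwPriority, List.mem_cons, List.not_mem_nil, or_false] at hm
      rcases hm with rfl | rfl | rfl | rfl | rfl | rfl | rfl | rfl | rfl | rfl | rfl | rfl | rfl | rfl | rfl | rfl
      · exact absurd hin h1.1
      · exact absurd hin h1.2.1
      · exact absurd hin h1.2.2
      · exact absurd hin h2.1
      · exact absurd hin h2.2.1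
      · exact absurd hin h2.2.2
      · decide
      · decide
      · decide
      · decide
      · decide
      · decide
      · decide
      · decide
      · decide
      · decide
    have heq : pvBest ((PySem.Str.lower query).toList) = 2 := le_antisymm hle hge
    rw [heq]
    decide
  · -- branch 3: institution_focused
    simp only [List.any_cons, List.any_nil, Bool.or_eq_true, Bool.false_eq_true, or_false, not_or, PySem.Str.isIn_eq] at h1 h2 h3 h4
    have hle : pvBest ((PySem.Str.lower query).toList) ≤ 3 := by
      rcases h4 with h | h | h
      · exact pvBest_le_of_isIn _ ("icar", 3) (by simp [pvKwPriority]) (by decide) h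
      · exact pvBest_le_of_isIn _ ("iari", 3) (by simp [pvKwPriority]) (by decide) h
      · exact pvBest_le_of_isIn _ ("research", 3) (by simp [pvKwPriority]) (by decide) h
    have hge : 3 ≤ pvBest ((PySem.Str.lower query).toList) := by
      refine pvBest_ge _ 3 (by omega) ?_
      intro kp hm hin
      simp only [pvKwPriority, List.mem_cons, List.not_mem_nil, or_false] at hm
      rcases hm with rfl | rfl | rfl | rfl | rfl | rfl | rfl | rfl | rfl | rfl | rfl | rfl | rfl | rfl | rfl | rfl
      · exact absurd hin h1.1
      · exact absurd hin h1.2.1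
      · exact absurd hin h1.2.2
      · exact absurd hin h2.1
      · exact absurd hin h2.2.1
      · exact absurd hin h2.2.2
      · exact absurd hin h3.1
      · exact absurd hin h3.2.1
      · exact absurd hin h3.2.2
      · decide
      · decide
      · decide
      · decide
      · decide
      · decide
      · decide
    have heq : pvBest ((PySem.Str.lower query).toList) = 3 := le_antisymm hle hge
    rw [heq]
    decide
  · -- branch 4: technology_integration
    simp only [List.any_cons, List.any_nil, Bool.or_eq_true, Bool.false_eq_true, or_false, not_or, PySem.Str.isIn_eq] at h1 h2 h3 h4 h5
    have hle : pvBest ((PySem.Str.lower query).toList) ≤ 4 := by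
      rcases h5 with h | h | h | h
      · exact pvBest_le_of_isIn _ ("iot", 4) (by simp [pvKwPriority]) (by decide) h
      · exact pvBest_le_of_isIn _ ("ai", 4) (by simp [pvKwPriority]) (by decide) h
      · exact pvBest_le_of_isIn _ ("precision", 4) (by simp [pvKwPriority]) (by decide) h
      · exact pvBest_le_of_isIn _ ("smart", 4) (by simp [pvKwPriority]) (by decide) h
    have hge : 4 ≤ pvBest ((PySem.Str.lower query).toList) := by
      refine pvBest_ge _ 4 (by omega) ?_
      intro kp hm hin
      simp only [pvKwPriority, List.mem_cons, List.not_mem_nil, or_false] at hm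
      rcases hm with rfl | rfl | rfl | rfl | rfl | rfl | rfl | rfl | rfl | rfl | rfl | rfl | rfl | rfl | rfl | rfl
      · exact absurd hin h1.1
      · exact absurd hin h1.2.1
      · exact absurd hin h1.2.2
      · exact absurd hin h2.1
      · exact absurd hin h2.2.1
      · exact absurd hin h2.2.2
      · exact absurd hin h3.1
      · exact absurd hin h3.2.1
      · exact absurd hin h3.2.2
      · exact absurd hin h4.1
      · exact absurd hin h4.2.1
      · exact absurd hin h4.2.2
      · decide
      · decide
      · decide
      · decide
    have heq : pvBest ((PySem.Str.lower query).toList) = 4 := le_antisymm hle hge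
    rw [heq]
    decide
  · -- no keyword matched: general_exploration
    simp only [List.any_cons, List.any_nil, Bool.or_eq_true, Bool.false_eq_true, or_false, not_or, PySem.Str.isIn_eq] at h1 h2 h3 h4 h5
    have hge : 5 ≤ pvBest ((PySem.Str.lower query).toList) := by
      refine pvBest_ge _ 5 (by omega) ?_
      intro kp hm hin
      simp only [pvKwPriority, List.mem_cons, List.not_mem_nil, or_false] at hm
      rcases hm with rfl | rfl | rfl | rfl | rfl | rfl | rfl | rfl | rfl | rfl | rfl | rfl | rfl | rfl | rfl | rfl
      · exact absurd hin h1.1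
      · exact absurd hin h1.2.1
      · exact absurd hin h1.2.2
      · exact absurd hin h2.1
      · exact absurd hin h2.2.1
      · exact absurd hin h2.2.2
      · exact absurd hin h3.1
      · exact absurd hin h3.2.1
      · exact absurd hin h3.2.2
      · exact absurd hin h4.1
      · exact absurd hin h4.2.1
      · exact absurd hin h4.2.2
      · exact absurd hin h5.1
      · exact absurd hin h5.2.1
      · exact absurd hin h5.2.2.1
      · exact absurd hin h5.2.2.2
    have heq : pvBest ((PySem.Str.lower query).toList) = 5 := le_antisymm (pvBest_le _) hge
    rw [heq]
    decide
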